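-- pv_equiv track=rewrite | github.com/Borey13/test-repo | module3/part3/слова_меньше_5.py | len_word_less_five
-- ===== SOURCE A (Python) =====
-- import string
--
-- def len_word_less_five(strings):
--     strings = strings.lower()
--
--     for symbol in string.punctuation:
--         if symbol in strings:
--             strings = strings.replace(symbol, '')
--
--     list_words = list(strings.split())
--     only_words_less_five = []
--
--     for word in list_words:
--         if len(word) < 5:
--             only_words_less_five.append(word)
--
--     return only_words_less_five
-- ===== SOURCE B (Python) =====
-- import string
--
-- def len_word_less_five(strings):
--     result = []
--     for token in strings.lower().split():
--         cleaned = ''.join(c for c in token if c not in string.punctuation)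
--         if cleaned and len(cleaned) < 5:
--             result.append(cleaned)
--     return result
-- ===== Notes on version B (the rewrite author's own statement) =====
-- stated objective: alternative
-- what changed: B splits into tokens first and strips punctuation per token with a single character filter (keeping only non-empty cleaned tokens), instead of A's 32 whole-string membership-test+replace passes before splitting.
import Mathlib
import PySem

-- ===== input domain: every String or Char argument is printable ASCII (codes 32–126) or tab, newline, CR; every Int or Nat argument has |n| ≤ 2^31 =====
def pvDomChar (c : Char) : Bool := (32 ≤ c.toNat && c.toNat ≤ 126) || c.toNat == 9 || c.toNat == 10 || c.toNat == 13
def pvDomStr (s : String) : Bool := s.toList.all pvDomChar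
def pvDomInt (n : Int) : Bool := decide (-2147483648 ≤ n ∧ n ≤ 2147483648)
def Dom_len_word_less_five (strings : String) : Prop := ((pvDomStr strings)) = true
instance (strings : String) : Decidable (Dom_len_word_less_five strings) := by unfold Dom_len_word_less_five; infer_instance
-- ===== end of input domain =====

-- Alternative decomposition: B splits into tokens first and strips punctuation per token with one
-- character filter (keeping only non-empty cleaned tokens), instead of A's 32 whole-string
-- membership-test+replace passes before splitting.

-- string.punctuation (shared module constant)
def pyPunct : List Char := "!\"#$%&'()*+,-./:;<=>?@[\\]^_`{|}~".toList

-- ===== PORT A =====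
def len_word_less_five (strings : String) : List String :=
  let strings1 := PySem.Str.lower strings
  let strings2 := pyPunct.foldl
    (fun s symbol =>
      if PySem.Str.isIn (String.ofList [symbol]) s
      then PySem.Str.replace s (String.ofList [symbol]) ""
      else s) strings1
  let list_words := PySem.Str.split₀ strings2
  list_words.foldl (fun acc word => if decide (PySem.Str.len word < 5) = true then acc ++ [word] else acc) []

-- ===== PORT B =====
def cleanToken (w : String) : String :=
  String.ofList (w.toList.filter (fun c => !pyPunct.contains c))

def len_word_less_five_alt (strings : String) : List String :=
  (PySem.Str.split₀ (PySem.Str.lower strings)).foldl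
    (fun result token =>
      if ((cleanToken token != "") && decide (PySem.Str.len (cleanToken token) < 5)) = true
      then result ++ [cleanToken token] else result) []

-- ===== PRECONDITION & SPEC =====
def Spec_len_word_less_five (strings : String) (out : List String) : Prop := out = len_word_less_five_alt strings
instance (strings : String) (out : List String) : Decidable (Spec_len_word_less_five strings out) := by unfold Spec_len_word_less_five; infer_instance

-- ===== CLAIM (what is proved, stated in full; the proofs are below) =====
def Claim_equal_len_word_less_five : Prop := ∀ (strings : String), Dom_len_word_less_five strings → Spec_len_word_less_five strings (len_word_less_five strings)

-- ===== LEMMAS AND PROOFS =====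

-- replace with a single-char pattern and empty replacement is a character filter
theorem replace_go_single (c : Char) : ∀ (fuel : Nat) (l acc : List Char), l.length ≤ fuel →
    PySem.Chars.replace.go [c] [] fuel l acc = acc.reverse ++ l.filter (fun x => x != c) := by
  intro fuel
  induction fuel with
  | zero =>
    intro l acc h
    have : l = [] := by cases l <;> simp_all
    subst this
    simp [PySem.Chars.replace.go]
  | succ n ih =>
    intro l acc h
    cases l with
    | nil => simp [PySem.Chars.replace.go]
    | cons x t =>
      rw [PySem.Chars.replace.go]
      by_cases hx : x = c
      · subst hx
        simp only [List.isPrefixOf, BEq.rfl, Bool.true_and, if_pos,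
          List.length_cons, List.length_nil, List.drop_succ_cons, List.drop_zero,
          List.reverse_nil, List.nil_append]
        rw [ih t acc (by simp at h; omega)]
        simp
      · have hpre : [c].isPrefixOf (x :: t) = false := by
          simp [List.isPrefixOf]
          exact fun hxc => absurd hxc.symm hx
        rw [hpre]
        simp only [Bool.false_eq_true, if_false]
        rw [ih t (x :: acc) (by simp at h; omega)]
        simp [hx, bne]

theorem replace_single_eq_filter (c : Char) (l : List Char) :
    PySem.Chars.replace l [c] [] = l.filter (fun x => x != c) := by
  rw [PySem.Chars.replace]
  simp only [List.isEmpty_cons, Bool.false_eq_true, if_false]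
  simpa using replace_go_single c l.length l [] (le_refl _)

-- the whole punctuation-removal loop of A is one character filter
theorem foldl_remove_eq_filter (cs : List Char) : ∀ (l : List Char),
    cs.foldl (fun s c => if PySem.Chars.isIn [c] s then PySem.Chars.replace s [c] [] else s) l
      = l.filter (fun x => !cs.contains x) := by
  induction cs with
  | nil => intro l; simp
  | cons c cs ih =>
    intro l
    have hstep : (if PySem.Chars.isIn [c] l then PySem.Chars.replace l [c] [] else l)
        = l.filter (fun x => x != c) := by
      by_cases h : PySem.Chars.isIn [c] l = true
      · rw [if_pos h, replace_single_eq_filter]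
      · rw [if_neg (by simp [h])]
        have hcm : c ∉ l := by
          have := (PySem.Chars.isIn_eq_false_iff [c] l).mp (Bool.eq_false_iff.mpr h)
          rw [List.singleton_infix_iff] at this
          exact this
        rw [List.filter_eq_self.mpr]
        intro a ha
        simp [bne]
        exact fun he => hcm (he ▸ ha)
    rw [List.foldl_cons, hstep, ih, List.filter_filter]
    apply List.filter_congr
    intro x _
    by_cases hxc : x = c <;> simp [hxc, bne]

-- split() via List.splitOnP
theorem split₀_go_spec : ∀ (l cur : List Char) (accL : List (List Char)),
    PySem.Chars.split₀.go l cur accL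
      = accL.reverse ++ (((l.splitOnP PySem.Chars.isspace).modifyHead (cur.reverse ++ ·)).filter (fun w => !w.isEmpty)) := by
  intro l
  induction l with
  | nil =>
    intro cur accL
    rw [PySem.Chars.split₀.go]
    by_cases hc : cur = []
    · subst hc; simp
    · rw [if_neg (by simpa using hc)]
      simp [List.splitOnP_nil, hc]
  | cons c rest ih =>
    intro cur accL
    rw [PySem.Chars.split₀.go]
    obtain ⟨h, t, hsplit⟩ := List.exists_cons_of_ne_nil (List.splitOnP_ne_nil PySem.Chars.isspace rest)
    by_cases hs : PySem.Chars.isspace c = true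
    · rw [if_pos hs]
      by_cases hc : cur = []
      · subst hc
        rw [if_pos (by simp), ih, List.splitOnP_cons, if_pos hs]
        simp [hsplit]
      · rw [if_neg (by simpa using hc), ih, List.splitOnP_cons, if_pos hs]
        simp [hsplit, hc]
    · rw [if_neg hs, ih, List.splitOnP_cons, if_neg hs]
      simp [hsplit]

theorem split₀_eq (l : List Char) :
    PySem.Chars.split₀ l = (l.splitOnP PySem.Chars.isspace).filter (fun w => !w.isEmpty) := by
  rw [PySem.Chars.split₀, split₀_go_spec]
  obtain ⟨h, t, hsplit⟩ := List.exists_cons_of_ne_nil (List.splitOnP_ne_nil PySem.Chars.isspace l)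
  simp [hsplit]

-- filtering characters that are never separators commutes with splitting
theorem splitOnP_filter (p q : Char → Bool) (hpq : ∀ c, p c = true → q c = true) :
    ∀ (l : List Char), (l.filter q).splitOnP p = (l.splitOnP p).map (List.filter q) := by
  intro l
  induction l with
  | nil => simp
  | cons c rest ih =>
    obtain ⟨h, t, hsplit⟩ := List.exists_cons_of_ne_nil (List.splitOnP_ne_nil p rest)
    by_cases hp : p c = true
    · rw [List.filter_cons_of_pos (hpq c hp), List.splitOnP_cons, if_pos hp,
        List.splitOnP_cons, if_pos hp, ih]
      simp
    · by_cases hq : q c = true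
      · rw [List.filter_cons_of_pos hq, List.splitOnP_cons, if_neg hp,
          List.splitOnP_cons, if_neg hp, ih]
        simp [hsplit, List.filter_cons_of_pos hq]
      · rw [List.filter_cons_of_neg (by simpa using hq), List.splitOnP_cons, if_neg hp, ih]
        simp [hsplit, List.filter_cons_of_neg (by simpa using hq)]

-- dropping empty tokens before a map sending [] to [] and a filter rejecting [] changes nothing
theorem filter_map_dropEmpty (f : List Char → List Char) (r : List Char → Bool)
    (hf : f [] = []) (hr : r [] = false) : ∀ (X : List (List Char)),
    ((X.filter (fun w => !w.isEmpty)).map f).filter r = (X.map f).filter r := by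
  intro X
  induction X with
  | nil => simp
  | cons x X ih =>
    cases x with
    | nil => simpa [hf, hr] using ih
    | cons a w =>
      simp only [List.filter_cons, List.isEmpty_cons, Bool.not_false, if_true, List.map_cons]
      rw [ih]

theorem isspace_not_punct (c : Char) (h : PySem.Chars.isspace c = true) : pyPunct.contains c = false := by
  have hall : pyPunct.all (fun c => !PySem.Chars.isspace c) = true := by decide
  rw [List.all_eq_true] at hall
  by_contra hc
  have hm : c ∈ pyPunct := by
    simpa [List.contains_eq_mem] using (Bool.not_eq_false _).mp hc
  have := hall c hm
  simp [h] at this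

-- the String-level punctuation loop of A, seen through .toList
theorem strfold_toList (cs : List Char) : ∀ (s : String),
    (cs.foldl (fun s symbol =>
      if PySem.Str.isIn (String.ofList [symbol]) s
      then PySem.Str.replace s (String.ofList [symbol]) "" else s) s).toList
    = cs.foldl (fun l c => if PySem.Chars.isIn [c] l then PySem.Chars.replace l [c] [] else l) s.toList := by
  induction cs with
  | nil => intro s; rfl
  | cons c cs ih =>
    intro s
    rw [List.foldl_cons, List.foldl_cons, ih]
    congr 1
    by_cases h : PySem.Chars.isIn [c] s.toList = true <;>
      simp [PySem.Str.isIn, PySem.Str.replace, h]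

theorem len_ofList (w : List Char) : PySem.Str.len (String.ofList w) = (w.length : Int) := by
  simp [PySem.Str.len]

theorem ofList_eq_empty_iff (u : List Char) : String.ofList u = "" ↔ u = [] := by
  constructor
  · intro h; have := congrArg String.toList h; simpa using this
  · intro h; subst h; rfl

theorem bne_ofList_empty (u : List Char) : (String.ofList u != "") = !u.isEmpty := by
  rw [bne]
  congr 1
  rw [Bool.eq_iff_iff, beq_iff_eq, List.isEmpty_iff, ofList_eq_empty_iff]

-- the character-list core of the equivalence
theorem core_eq (M : List Char) :
    (PySem.Chars.split₀ (M.filter (fun x => !pyPunct.contains x))).filter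
        (fun w => decide ((w.length : Int) < 5))
      = ((PySem.Chars.split₀ M).map (List.filter (fun x => !pyPunct.contains x))).filter
        (fun u => !u.isEmpty && decide ((u.length : Int) < 5)) := by
  rw [split₀_eq, split₀_eq,
    splitOnP_filter PySem.Chars.isspace (fun x => !pyPunct.contains x)
      (fun c hc => by have := isspace_not_punct c hc; simp only [Bool.not_eq_true']; simpa [List.contains_eq_mem] using this) M,
    List.filter_filter,
    filter_map_dropEmpty (List.filter (fun x => !pyPunct.contains x))
      (fun u => !u.isEmpty && decide ((u.length : Int) < 5)) rfl rfl]
  apply List.filter_congr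
  intro w _
  exact Bool.and_comm _ _

-- ===== VERDICT (by name: the statement is the Claim_ definition above) =====
theorem len_word_less_five_spec : Claim_equal_len_word_less_five := by
  intro strings _
  unfold Spec_len_word_less_five
  simp only [len_word_less_five, len_word_less_five_alt]
  rw [PySem.List.foldl_append_if (fun word => decide (PySem.Str.len word < 5)) (fun word => word),
    PySem.List.foldl_append_if
      (fun token => (cleanToken token != "") && decide (PySem.Str.len (cleanToken token) < 5))
      (fun token => cleanToken token)]
  simp only [List.nil_append, List.map_id']
  rw [PySem.Str.split₀, PySem.Str.split₀, strfold_toList, foldl_remove_eq_filter,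
    List.filter_map, List.filter_map, List.map_map]
  have hB : ∀ w : List Char,
      cleanToken (String.ofList w) = String.ofList (w.filter (fun x => !pyPunct.contains x)) := by
    intro w; simp [cleanToken]
  have hcondB : ((fun token => (cleanToken token != "") && decide (PySem.Str.len (cleanToken token) < 5))
        ∘ String.ofList)
      = fun w : List Char =>
          (!(w.filter (fun x => !pyPunct.contains x)).isEmpty
            && decide (((w.filter (fun x => !pyPunct.contains x)).length : Int) < 5)) := by
    funext w
    simp only [Function.comp_apply, hB, bne_ofList_empty, len_ofList]
  rw [hcondB]
  have hcondA' : ((fun word => decide (PySem.Str.len word < 5)) ∘ String.ofList)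
      = fun w : List Char => decide ((w.length : Int) < 5) := by
    funext w; simp [PySem.Str.len]
  have hmapB : ((fun token => cleanToken token) ∘ String.ofList)
      = (String.ofList ∘ List.filter (fun x => !pyPunct.contains x)) := by
    funext w; simp [hB]
  rw [hcondA', hmapB]
  have hr : (fun w : List Char =>
        !(List.filter (fun x => !pyPunct.contains x) w).isEmpty &&
          decide (((List.filter (fun x => !pyPunct.contains x) w).length : Int) < 5))
      = ((fun u : List Char => !u.isEmpty && decide ((u.length : Int) < 5))
          ∘ List.filter (fun x => !pyPunct.contains x)) := rfl
  rw [hr, ← List.map_map, ← List.filter_map, core_eq]
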